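-- pv_equiv track=rewrite | github.com/Rhea-Roxy/CSC-370-Programming-Languages | dirSort.py | dirsort
-- ===== SOURCE A (Python) =====
-- import collections
--
-- def dirsort(dirs):
--     result = []
--     dict = collections.defaultdict(list)
--     for i in range(len(dirs)):
--         dict[dirs[i].count('/')].append(dirs[i])
--
--     for key in sorted(dict.keys()):
--         dict.get(key).sort()
--         for ke in dict.get(key): result.append(ke)
--     return result
-- ===== SOURCE B (Python) =====
-- def dirsort(dirs):
--     return sorted(dirs, key=lambda d: (d.count('/'), d))
-- ===== Notes on version B (the rewrite author's own statement) =====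
-- stated objective: simpler
-- what changed: Replaces the defaultdict bucket table keyed by slash count plus per-bucket sort-and-concatenate with a single one-pass sort under the composite key (slash count, string).
import Mathlib
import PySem

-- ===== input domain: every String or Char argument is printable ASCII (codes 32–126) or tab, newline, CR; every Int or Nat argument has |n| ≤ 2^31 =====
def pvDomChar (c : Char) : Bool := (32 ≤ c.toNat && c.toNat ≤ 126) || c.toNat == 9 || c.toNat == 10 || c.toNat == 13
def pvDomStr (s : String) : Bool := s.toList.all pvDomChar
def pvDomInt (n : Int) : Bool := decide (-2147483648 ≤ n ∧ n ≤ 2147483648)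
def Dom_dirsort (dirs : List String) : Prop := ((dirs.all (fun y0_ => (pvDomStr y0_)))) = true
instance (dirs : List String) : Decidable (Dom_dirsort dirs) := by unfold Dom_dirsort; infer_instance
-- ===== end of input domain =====

-- B replaces A's depth-indexed bucket table (defaultdict + per-bucket sort + concatenation)
-- with a single sort under the composite key (slash count, string): simpler, same result.

-- ===== PORT A =====
def dirsort (dirs : List String) : List String :=
  let d : PySem.Dict Nat (List String) :=
    dirs.foldl (fun d s => d.modify (PySem.Str.count s "/") [] (fun b => b ++ [s])) PySem.Dict.empty
  (PySem.List.sorted d.keys (fun k => k) false).foldl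
    (fun result k =>
      (PySem.List.sorted (d.getD k []) (fun s => s) false).foldl
        (fun result ke => result ++ [ke]) result)
    []

-- ===== PORT B =====
def dirsort_alt (dirs : List String) : List String :=
  PySem.List.sorted2 dirs (fun s => PySem.Str.count s "/") (fun s => s) false

-- ===== PRECONDITION & SPEC =====
def Spec_dirsort (dirs : List String) (out : List String) : Prop := out = dirsort_alt dirs
instance (dirs : List String) (out : List String) : Decidable (Spec_dirsort dirs out) := by unfold Spec_dirsort; infer_instance

-- ===== CLAIM (what is proved, stated in full; the proofs are below) =====
def Claim_equal_dirsort : Prop := ∀ (dirs : List String), Dom_dirsort dirs → Spec_dirsort dirs (dirsort dirs)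

-- ===== LEMMAS AND PROOFS =====

-- the composite key "(c(d), d)" as a lexicographic linear order (c = slash count below)
def pvKey (c : String → Nat) (s : String) : Lex (Nat × String) := toLex (c s, s)

theorem pvKey_injective (c : String → Nat) : Function.Injective (pvKey c) := by
  intro a b h
  have h2 : (ofLex (pvKey c a)).2 = (ofLex (pvKey c b)).2 := by rw [h]
  simpa [pvKey] using h2

-- B's sorted2 with keys (c, id) is sorting by the lexicographic composite key
theorem sorted2_eq_sorted_lex (c : String → Nat) (dirs : List String) :
    PySem.List.sorted2 dirs c (fun s => s) false
      = PySem.List.sorted dirs (pvKey c) false := by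
  have hb : (fun (a b : String) => decide (c a < c b) || (!decide (c b < c a) && decide (a < b)))
      = fun a b => decide (pvKey c a < pvKey c b) := by
    funext a b
    by_cases h1 : c a < c b <;> by_cases h2 : c b < c a <;>
      simp [pvKey, Prod.Lex.toLex_lt_toLex, h1, h2] <;> omega
  show List.foldl
      (fun acc x => PySem.List.insertBy
        (fun a b => decide (c a < c b) || (!decide (c b < c a) && decide (a < b))) x acc) [] dirs
    = List.foldl
      (fun acc x => PySem.List.insertBy (fun a b => decide (pvKey c a < pvKey c b)) x acc) [] dirs
  rw [hb]

-- the bucket table: getD k [] is the sublist of dirs with count k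
theorem bucket_eq (c : String → Nat) (dirs : List String) (k : Nat) :
    ((dirs.foldl (fun d s => d.modify (c s) [] (fun b => b ++ [s]))
        PySem.Dict.empty).getD k [])
      = dirs.filter (fun s => c s == k) := by
  have hm : dirs.foldl (fun d s => d.modify (c s) [] (fun b => b ++ [s])) PySem.Dict.empty
      = (dirs.map (fun s => (c s, s))).foldl
          (fun d p => d.modify p.1 [] (fun b => b ++ [p.2])) PySem.Dict.empty := by
    rw [List.foldl_map]
  rw [hm, PySem.Dict.getD_foldl_modify_append]
  simp [List.filter_map, Function.comp_def]

theorem keys_eq (c : String → Nat) (dirs : List String) :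
    (dirs.foldl (fun d s => d.modify (c s) [] (fun b => b ++ [s]))
        PySem.Dict.empty).keys
      = PySem.Set.ofList (dirs.map c) := by
  rw [PySem.Dict.keys_foldl_modify_key dirs c [] (fun _ s => fun b => b ++ [s]) PySem.Dict.empty]
  simp [PySem.Set.update_nil_left]

theorem foldl_snoc (l : List String) (acc : List String) :
    l.foldl (fun r x => r ++ [x]) acc = acc ++ l := by
  simpa using PySem.List.foldl_append_singleton_eq_map (fun x => x) l acc

-- A in closed form: concatenate, over the strictly increasing list of occurring counts,
-- the lexicographically sorted bucket of each count
theorem dirsort_shape (dirs : List String) :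
    dirsort dirs
      = (PySem.List.sorted (PySem.Set.ofList (dirs.map (fun s => PySem.Str.count s "/")))
            (fun k => k) false).flatMap
          (fun k => PySem.List.sorted (dirs.filter (fun s => PySem.Str.count s "/" == k))
            (fun s => s) false) := by
  unfold dirsort
  simp only [foldl_snoc, keys_eq (fun s => PySem.Str.count s "/"),
    bucket_eq (fun s => PySem.Str.count s "/")]
  simpa using PySem.List.foldl_append_eq_flatMap
    (fun k => PySem.List.sorted (dirs.filter (fun s => PySem.Str.count s "/" == k))
      (fun s => s) false)
    (PySem.List.sorted (PySem.Set.ofList (dirs.map (fun s => PySem.Str.count s "/")))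
      (fun k => k) false) []

theorem count_flatMap_buckets (c : String → Nat) (dirs : List String) (a : String) :
    ∀ (ks : List Nat), ks.Nodup →
      ((ks.flatMap (fun k => PySem.List.sorted (dirs.filter (fun s => c s == k))
          (fun s => s) false)).count a)
        = if c a ∈ ks then dirs.count a else 0 := by
  intro ks
  induction ks with
  | nil => simp
  | cons k t ih =>
    intro hnd
    rw [List.flatMap_cons, List.count_append,
      ((PySem.List.sorted_perm (dirs.filter (fun s => c s == k)) (fun s => s) false)).count_eq,
      ih (List.Nodup.of_cons hnd)]
    by_cases hk : c a = k
    · have hca : List.count a (dirs.filter (fun s => c s == k)) = dirs.count a :=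
        List.count_filter (by simp [hk])
      have hnotin : c a ∉ t := by
        intro hmem; exact (List.nodup_cons.mp hnd).1 (hk ▸ hmem)
      rw [hk] at hnotin
      simp [hca, hk, hnotin]
    · have hca : List.count a (dirs.filter (fun s => c s == k)) = 0 := by
        rw [List.count_eq_zero]
        intro hmem
        have := (List.mem_filter.mp hmem).2
        exact hk (by simpa using this)
      simp [hca, hk]

theorem flatMap_buckets_perm (c : String → Nat) (dirs : List String) :
    ((PySem.List.sorted (PySem.Set.ofList (dirs.map c)) (fun k => k) false).flatMap
        (fun k => PySem.List.sorted (dirs.filter (fun s => c s == k))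
          (fun s => s) false)).Perm dirs := by
  rw [List.perm_iff_count]
  intro a
  have hnd : (PySem.List.sorted (PySem.Set.ofList (dirs.map c)) (fun k => k) false).Nodup :=
    ((PySem.List.sorted_perm _ _ _).nodup_iff).mpr (PySem.Set.nodup_ofList (dirs.map c))
  rw [count_flatMap_buckets c dirs a _ hnd]
  by_cases ha : a ∈ dirs
  · have hmem : c a ∈ PySem.List.sorted (PySem.Set.ofList (dirs.map c)) (fun k => k) false := by
      rw [PySem.List.mem_sorted, PySem.Set.mem_ofList]
      exact List.mem_map_of_mem ha
    simp [hmem]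
  · have h0 : dirs.count a = 0 := List.count_eq_zero.mpr ha
    simp [h0]

theorem flatMap_buckets_pairwise (c : String → Nat) (dirs : List String) :
    ((PySem.List.sorted (PySem.Set.ofList (dirs.map c)) (fun k => k) false).flatMap
        (fun k => PySem.List.sorted (dirs.filter (fun s => c s == k))
          (fun s => s) false)).Pairwise (fun a b => pvKey c a ≤ pvKey c b) := by
  rw [List.pairwise_flatMap]
  constructor
  · intro k _
    have hp := PySem.List.sorted_pairwise (dirs.filter (fun s => c s == k)) (fun s => s)
    refine hp.imp_of_mem ?_
    intro x y hx hy hxy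
    have hcx : c x = k := by
      have := (List.mem_filter.mp ((PySem.List.mem_sorted _ _ _ _).mp hx)).2
      simpa using this
    have hcy : c y = k := by
      have := (List.mem_filter.mp ((PySem.List.mem_sorted _ _ _ _).mp hy)).2
      simpa using this
    simp only [pvKey]
    rw [Prod.Lex.toLex_le_toLex]
    exact Or.inr ⟨hcx.trans hcy.symm, hxy⟩
  · have hlt := PySem.List.sorted_ofList_pairwise_lt (dirs.map c)
    refine hlt.imp ?_
    intro k₁ k₂ hk x hx y hy
    have hcx : c x = k₁ := by
      have := (List.mem_filter.mp ((PySem.List.mem_sorted _ _ _ _).mp hx)).2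
      simpa using this
    have hcy : c y = k₂ := by
      have := (List.mem_filter.mp ((PySem.List.mem_sorted _ _ _ _).mp hy)).2
      simpa using this
    simp only [pvKey]
    rw [Prod.Lex.toLex_le_toLex]
    exact Or.inl (by rw [hcx, hcy]; exact hk)

theorem dirsort_eq_alt (dirs : List String) : dirsort dirs = dirsort_alt dirs := by
  rw [dirsort_shape, dirsort_alt,
    sorted2_eq_sorted_lex (fun s => PySem.Str.count s "/") dirs]
  exact PySem.List.eq_of_perm_of_pairwise_le_of_injective (pvKey (fun s => PySem.Str.count s "/"))
    (pvKey_injective _)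
    ((flatMap_buckets_perm _ dirs).trans
      (PySem.List.sorted_perm dirs (pvKey (fun s => PySem.Str.count s "/")) false).symm)
    (flatMap_buckets_pairwise _ dirs)
    (PySem.List.sorted_pairwise dirs (pvKey (fun s => PySem.Str.count s "/")))

-- ===== VERDICT (by name: the statement is the Claim_ definition above) =====
theorem dirsort_spec : Claim_equal_dirsort := by
  intro dirs _
  exact dirsort_eq_alt dirs
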